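-- pv_equiv track=rewrite | github.com/marceloslacerda/tbs | tbs/docparse.py | lower_message
-- ===== SOURCE A (Python) =====
-- def lower_message(message):
--     buff = []
--     open_quote = False
--     for c in message:
--         if c in '\'"':
--             open_quote = not open_quote
--         if not open_quote:
--             c = c.lower()
--         buff.append(c)
--     message = ''.join(buff)
--     return message
-- ===== SOURCE B (Python) =====
-- def lower_message(message):
--     # Segment-wise: split at quote delimiters, lowercase the chunks that
--     # lie outside quoted regions, keep quoted chunks verbatim.
--     parts = []
--     inside = False
--     i = 0
--     n = len(message)
--     while i < n:
--         j = i
--         while j < n and message[j] not in '\'"':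
--             j += 1
--         chunk = message[i:j]
--         parts.append(chunk if inside else chunk.lower())
--         if j < n:
--             parts.append(message[j])
--             inside = not inside
--         i = j + 1
--     return ''.join(parts)
-- ===== Notes on version B (the rewrite author's own statement) =====
-- stated objective: alternative
-- what changed: Replaces A's char-by-char state machine (per-character quote toggle and conditional lowering) by a segment-wise pass that scans to each quote delimiter, lowercases whole chunks outside quotes and copies quoted chunks verbatim.
import Mathlib
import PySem

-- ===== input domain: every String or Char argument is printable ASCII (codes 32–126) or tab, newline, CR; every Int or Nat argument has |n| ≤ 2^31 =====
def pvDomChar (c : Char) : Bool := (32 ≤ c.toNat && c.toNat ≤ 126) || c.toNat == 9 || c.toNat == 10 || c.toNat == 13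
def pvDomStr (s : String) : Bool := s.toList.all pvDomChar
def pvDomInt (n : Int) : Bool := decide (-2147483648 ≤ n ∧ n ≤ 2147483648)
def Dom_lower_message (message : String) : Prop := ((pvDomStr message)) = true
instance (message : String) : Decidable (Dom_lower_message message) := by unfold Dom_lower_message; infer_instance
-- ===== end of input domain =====

-- B lowercases whole between-quote segments at once instead of A's per-character
-- quote-toggle state machine; alternative decomposition, same O(n) cost.


-- ===== PORT A =====
-- one iteration of A's for-loop: toggle open_quote on a quote char, lower c when outside
def pvStepA (st : List Char × Bool) (c : Char) : List Char × Bool :=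
  let oq := if c == '\'' || c == '"' then !st.2 else st.2
  let c' := if !oq then PySem.Chars.lowerChar c else c
  (st.1 ++ [c'], oq)

def lower_message (message : String) : String :=
  String.ofList ((message.toList.foldl pvStepA ([], false)).1)

-- ===== PORT B =====
def pvIsQuote (c : Char) : Bool := c == '\'' || c == '"'

-- B's outer while-loop: one chunk up to the next quote delimiter per call
def pvAltGo (cs : List Char) (inside : Bool) : List Char :=
  let chunk := cs.takeWhile (fun c => !pvIsQuote c)
  let rest := cs.dropWhile (fun c => !pvIsQuote c)
  let chunk' := if inside then chunk else PySem.Chars.lower chunk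
  if hrest : rest = [] then chunk'
  else chunk' ++ rest.head hrest :: pvAltGo rest.tail (!inside)
termination_by cs.length
decreasing_by
  have hle := List.length_dropWhile_le (p := fun c => !pvIsQuote c) (l := cs)
  have hpos : 0 < (cs.dropWhile (fun c => !pvIsQuote c)).length :=
    List.length_pos_of_ne_nil hrest
  simp [List.length_tail]
  omega

def lower_message_alt (message : String) : String :=
  String.ofList (pvAltGo message.toList false)

-- ===== PRECONDITION & SPEC =====
def Spec_lower_message (message : String) (out : String) : Prop := out = lower_message_alt message
instance (message : String) (out : String) : Decidable (Spec_lower_message message out) := by unfold Spec_lower_message; infer_instance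

-- ===== CLAIM (what is proved, stated in full; the proofs are below) =====
def Claim_equal_lower_message : Prop := ∀ (message : String), Dom_lower_message message → Spec_lower_message message (lower_message message)

-- ===== LEMMAS AND PROOFS =====

theorem pvAltGo_nil (inside : Bool) : pvAltGo [] inside = [] := by
  unfold pvAltGo; simp [PySem.Chars.lower]

theorem pvLowerChar_quote (c : Char) (h : pvIsQuote c = true) :
    PySem.Chars.lowerChar c = c := by
  simp [pvIsQuote] at h
  rcases h with h | h <;> subst h <;> decide

theorem pvDropWhile_quote_cons (c : Char) (cs : List Char) (hq : pvIsQuote c = true) :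
    List.dropWhile (fun x => !pvIsQuote x) (c :: cs) = c :: cs := by
  simp [hq]

theorem pvDropWhile_nonquote_cons (c : Char) (cs : List Char) (hq : pvIsQuote c = false) :
    List.dropWhile (fun x => !pvIsQuote x) (c :: cs) = List.dropWhile (fun x => !pvIsQuote x) cs := by
  simp [hq]

theorem pvAltGo_cons (c : Char) (cs : List Char) (inside : Bool) :
    pvAltGo (c :: cs) inside =
      if pvIsQuote c then c :: pvAltGo cs (!inside)
      else (if inside then c else PySem.Chars.lowerChar c) :: pvAltGo cs inside := by
  by_cases hq : pvIsQuote c = true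
  · rw [if_pos hq]
    conv_lhs => unfold pvAltGo
    simp [pvDropWhile_quote_cons c cs hq, hq, PySem.Chars.lower]
  · have hq' : pvIsQuote c = false := by simpa using hq
    rw [if_neg hq]
    conv_lhs => unfold pvAltGo
    conv_rhs => rw [show pvAltGo cs inside = _ from rfl]; unfold pvAltGo
    by_cases hr : List.dropWhile (fun x => !pvIsQuote x) cs = []
    · simp [pvDropWhile_nonquote_cons c cs hq', hq', hr,
        PySem.Chars.lower]; cases inside <;> simp
    · simp [pvDropWhile_nonquote_cons c cs hq', hq', hr,
        PySem.Chars.lower]; cases inside <;> simp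

theorem pvFoldA_eq (cs : List Char) : ∀ (acc : List Char) (inside : Bool),
    (cs.foldl pvStepA (acc, inside)).1 = acc ++ pvAltGo cs inside := by
  induction cs with
  | nil => intro acc inside; simp [pvAltGo_nil]
  | cons c cs ih =>
    intro acc inside
    rw [List.foldl_cons]
    by_cases hq : pvIsQuote c = true
    · have hlc := pvLowerChar_quote c hq
      simp only [pvIsQuote] at hq
      cases inside <;>
        simp [pvStepA, hq, hlc, ih, pvAltGo_cons, pvIsQuote]
    · have hq' : (c == '\'' || c == '"') = false := by
        simpa [pvIsQuote] using hq
      cases inside <;>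
        simp [pvStepA, ih, pvAltGo_cons, pvIsQuote, hq']
  
-- ===== VERDICT (by name: the statement is the Claim_ definition above) =====
theorem lower_message_spec : Claim_equal_lower_message := by
  intro message _
  unfold Spec_lower_message lower_message lower_message_alt
  rw [pvFoldA_eq]
  simp
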